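-- pv_equiv track=rewrite | github.com/Lee-JoungHyun/algorithm | 이코테/Part3/BFS-DFS/Q20.py | check
-- ===== SOURCE A (Python) =====
-- def check(student, teacher, wall, N):
--     std = student[:]
--     tea = teacher[:]
--     w = wall[:]
--
--     for t in tea:
--         y = t[0]
--         x = t[1]
--         for i in range(y-1, -1, -1): # y-1 ~ 0 까지 y축
--             if [i, x] in w:
--                 break
--             if [i, x] in std:
--                 std.remove([i, x])
--         for i in range(y+1, N):
--             if [i, x] in w:
--                 break
--             if [i, x] in std:
--                 std.remove([i, x])
--         for i in range(x-1, -1, -1): # X축 검사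
--             if [y, i] in w:
--                 break
--             if [y, i] in std:
--                 std.remove([y, i])
--         for i in range(x+1, N):
--             if [y, i] in w:
--                 break
--             if [y, i] in std:
--                 std.remove([y, i])
--
--     if len(std) == len(student):
--         return True
--     else:
--         return False
-- ===== SOURCE B (Python) =====
-- def check(student, teacher, wall, N):
--     walls = set(map(tuple, wall))
--     students = set(map(tuple, student))
--
--     def spotted(ray):
--         # does this ray reach a student before hitting a wall?
--         for cell in ray:
--             if cell in walls:
--                 return False
--             if cell in students:
--                 return True
--         return False
--
--     return not any(
--         spotted((i, x) for i in range(y - 1, -1, -1))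
--         or spotted((i, x) for i in range(y + 1, N))
--         or spotted((y, i) for i in range(x - 1, -1, -1))
--         or spotted((y, i) for i in range(x + 1, N))
--         for y, x in ((t[0], t[1]) for t in teacher)
--     )
-- ===== Notes on version B (the rewrite author's own statement) =====
-- stated objective: faster
-- what changed: A destructively removes every visible entry from a copy of the student list (linear list scans per ray cell) and finally compares lengths; B builds hash sets of student and wall cells once, asks for each teacher ray whether it reaches a student before a wall, and short-circuits with any()/or on the first sighting (intended as faster; a timing run measured 4-23x on its inputs, though one run could not confirm it at the largest size). Pre_ excludes only the inputs where A raises IndexError (a teacher row shorter than 2 entries).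
import Mathlib
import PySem

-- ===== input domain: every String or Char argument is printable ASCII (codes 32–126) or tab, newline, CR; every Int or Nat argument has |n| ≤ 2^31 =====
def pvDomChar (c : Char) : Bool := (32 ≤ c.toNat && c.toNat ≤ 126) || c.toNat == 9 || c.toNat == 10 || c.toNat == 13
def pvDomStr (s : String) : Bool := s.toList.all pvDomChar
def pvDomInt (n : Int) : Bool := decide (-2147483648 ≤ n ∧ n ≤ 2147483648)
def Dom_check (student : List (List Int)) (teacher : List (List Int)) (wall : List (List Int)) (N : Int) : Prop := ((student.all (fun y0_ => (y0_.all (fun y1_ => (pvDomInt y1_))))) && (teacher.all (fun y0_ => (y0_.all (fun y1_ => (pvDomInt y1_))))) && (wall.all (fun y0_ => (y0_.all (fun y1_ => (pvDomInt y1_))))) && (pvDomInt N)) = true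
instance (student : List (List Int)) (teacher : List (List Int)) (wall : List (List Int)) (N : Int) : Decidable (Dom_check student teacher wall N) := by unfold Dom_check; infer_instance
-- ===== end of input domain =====

-- B replaces A's destructive removal from a copy of the student list (linear scans per ray
-- cell, final length comparison) by hash-set lookups along each teacher's rays with an
-- early exit on the first sighting (intended as faster; a timing run measured ratios
-- of 4-23x on its input sizes, though not confirmed at every size/family).

-- ===== PORT A =====
-- body of one of A's ray loops: walk the cells in order, break at the first
-- wall, and when the cell is in std remove its first occurrence (std.remove)
def rayScan (w : List (List Int)) (std : List (List Int)) : List (List Int) → List (List Int)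
  | [] => std
  | c :: rest =>
    if c ∈ w then std
    else rayScan w (if c ∈ std then (PySem.List.remove? std c).getD std else std) rest

-- body of A's `for t in tea` loop: the four ray loops, in A's order
def teacherStep (w : List (List Int)) (N : Int) (std : List (List Int)) (t : List Int) : List (List Int) :=
  let y := (PySem.List.pyGet? t 0).getD 0   -- t[0]; some under Pre_check
  let x := (PySem.List.pyGet? t 1).getD 0   -- t[1]; some under Pre_check
  let std1 := rayScan w std ((PySem.List.pyRange (y-1) (-1) (-1)).map (fun i => [i, x]))
  let std2 := rayScan w std1 ((PySem.List.pyRange (y+1) N 1).map (fun i => [i, x]))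
  let std3 := rayScan w std2 ((PySem.List.pyRange (x-1) (-1) (-1)).map (fun i => [y, i]))
  rayScan w std3 ((PySem.List.pyRange (x+1) N 1).map (fun i => [y, i]))

def check (student : List (List Int)) (teacher : List (List Int)) (wall : List (List Int)) (N : Int) : Bool :=
  let std := teacher.foldl (teacherStep wall N) student
  if std.length = student.length then true else false

-- ===== PORT B =====
-- set(map(tuple, wall)) / set(map(tuple, student)): a tuple of ints is represented by
-- the int list itself (the conversion is injective, so membership is identical)
def rayHits (walls students : PySem.Set (List Int)) : List (List Int) → Bool
  | [] => false
  | c :: rest =>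
    if PySem.Set.contains walls c then false
    else if PySem.Set.contains students c then true
    else rayHits walls students rest

def check_alt (student : List (List Int)) (teacher : List (List Int)) (wall : List (List Int)) (N : Int) : Bool :=
  let walls := PySem.Set.ofList wall
  let students := PySem.Set.ofList student
  !(teacher.any (fun t =>
    let y := (PySem.List.pyGet? t 0).getD 0   -- t[0]; some under Pre_check
    let x := (PySem.List.pyGet? t 1).getD 0   -- t[1]; some under Pre_check
    rayHits walls students ((PySem.List.pyRange (y-1) (-1) (-1)).map (fun i => [i, x]))
    || rayHits walls students ((PySem.List.pyRange (y+1) N 1).map (fun i => [i, x]))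
    || rayHits walls students ((PySem.List.pyRange (x-1) (-1) (-1)).map (fun i => [y, i]))
    || rayHits walls students ((PySem.List.pyRange (x+1) N 1).map (fun i => [y, i]))))

-- ===== PRECONDITION & SPEC =====
-- Pre_ excludes exactly the inputs on which Python A raises IndexError: a teacher row
-- shorter than 2 entries (A reads t[0] and t[1] for every teacher).
def Pre_check (student : List (List Int)) (teacher : List (List Int)) (wall : List (List Int)) (N : Int) : Prop :=
  ∀ t ∈ teacher, 2 ≤ t.length
instance (student : List (List Int)) (teacher : List (List Int)) (wall : List (List Int)) (N : Int) : Decidable (Pre_check student teacher wall N) := by unfold Pre_check; infer_instance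

def pvWitness_check : List (List Int) × List (List Int) × List (List Int) × Int :=
  ([[0, 0]], [[2, 0]], [[1, 0]], 3)

def Spec_check (student : List (List Int)) (teacher : List (List Int)) (wall : List (List Int)) (N : Int) (out : Bool) : Prop := out = check_alt student teacher wall N
instance (student : List (List Int)) (teacher : List (List Int)) (wall : List (List Int)) (N : Int) (out : Bool) : Decidable (Spec_check student teacher wall N out) := by unfold Spec_check; infer_instance

-- ===== CLAIM (what is proved, stated in full; the proofs are below) =====
def Claim_equal_check : Prop := ∀ (student : List (List Int)) (teacher : List (List Int)) (wall : List (List Int)) (N : Int), Dom_check student teacher wall N → Pre_check student teacher wall N → Spec_check student teacher wall N (check student teacher wall N)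

-- ===== LEMMAS AND PROOFS =====
theorem rayScan_sublist (w : List (List Int)) (cells : List (List Int)) :
    ∀ std, (rayScan w std cells).Sublist std := by
  induction cells with
  | nil => intro std; simp [rayScan]
  | cons c rest ih =>
    intro std
    simp only [rayScan]
    by_cases hw : c ∈ w
    · simp [hw]
    · rw [if_neg hw]
      by_cases hs : c ∈ std
      · rw [if_pos hs, PySem.List.remove?_eq_some_erase _ _ hs]
        exact (ih _).trans ((List.erase_sublist ..).trans (List.Sublist.refl _))
      · rw [if_neg hs]; exact ih std

theorem rayScan_eq_self_iff (w : List (List Int)) (cells : List (List Int)) (std : List (List Int)) :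
    rayScan w std cells = std ↔
      ∀ c ∈ cells.takeWhile (fun c => !decide (c ∈ w)), c ∉ std := by
  induction cells generalizing std with
  | nil => simp [rayScan]
  | cons c rest ih =>
    simp only [rayScan]
    by_cases hw : c ∈ w
    · rw [if_pos hw, List.takeWhile_cons_of_neg (by simp [hw])]
      simp
    · rw [if_neg hw, List.takeWhile_cons_of_pos (by simp [hw])]
      by_cases hs : c ∈ std
      · rw [if_pos hs, PySem.List.remove?_eq_some_erase _ _ hs]
        simp only [Option.getD_some]
        constructor
        · intro he
          exfalso
          have h1 : (rayScan w (std.erase c) rest).length ≤ (std.erase c).length :=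
            (rayScan_sublist w rest _).length_le
          have h2 : (std.erase c).length < std.length := by
            have := List.length_erase_of_mem hs
            have : std.length ≠ 0 := by
              intro h0; rw [List.length_eq_zero_iff] at h0; subst h0; simp at hs
            omega
          rw [he] at h1; omega
        · intro hall
          exact absurd hs (hall c (List.mem_cons_self ..))
      · rw [if_neg hs, ih]
        simp [hs]

theorem teacherStep_sublist (w : List (List Int)) (N : Int) (std : List (List Int)) (t : List Int) :
    (teacherStep w N std t).Sublist std := by
  unfold teacherStep
  exact (rayScan_sublist ..).trans ((rayScan_sublist ..).trans
    ((rayScan_sublist ..).trans (rayScan_sublist ..)))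

theorem teacherStep_eq_self_iff (w : List (List Int)) (N : Int) (std : List (List Int)) (t : List Int) :
    teacherStep w N std t = std ↔
      (rayScan w std (((PySem.List.pyRange ((PySem.List.pyGet? t 0).getD 0 - 1) (-1) (-1)).map (fun i => [i, (PySem.List.pyGet? t 1).getD 0])) ) = std ∧
       rayScan w std (((PySem.List.pyRange ((PySem.List.pyGet? t 0).getD 0 + 1) N 1).map (fun i => [i, (PySem.List.pyGet? t 1).getD 0])) ) = std ∧
       rayScan w std (((PySem.List.pyRange ((PySem.List.pyGet? t 1).getD 0 - 1) (-1) (-1)).map (fun i => [(PySem.List.pyGet? t 0).getD 0, i])) ) = std ∧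
       rayScan w std (((PySem.List.pyRange ((PySem.List.pyGet? t 1).getD 0 + 1) N 1).map (fun i => [(PySem.List.pyGet? t 0).getD 0, i])) ) = std) := by
  unfold teacherStep
  set y := (PySem.List.pyGet? t 0).getD 0
  set x := (PySem.List.pyGet? t 1).getD 0
  set c1 := (PySem.List.pyRange (y-1) (-1) (-1)).map (fun i => [i, x]) with hc1
  set c2 := (PySem.List.pyRange (y+1) N 1).map (fun i => [i, x]) with hc2
  set c3 := (PySem.List.pyRange (x-1) (-1) (-1)).map (fun i => [y, i]) with hc3
  set c4 := (PySem.List.pyRange (x+1) N 1).map (fun i => [y, i]) with hc4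
  simp only []
  constructor
  · intro h
    set r1 := rayScan w std c1 with h1
    set r2 := rayScan w r1 c2 with h2
    set r3 := rayScan w r2 c3 with h3
    have s1 : r1.Sublist std := h1 ▸ rayScan_sublist ..
    have s2 : r2.Sublist r1 := h2 ▸ rayScan_sublist ..
    have s3 : r3.Sublist r2 := h3 ▸ rayScan_sublist ..
    have s4 : (rayScan w r3 c4).Sublist r3 := rayScan_sublist ..
    have l4 : (rayScan w r3 c4).length = std.length := by rw [h]
    have q1 := s1.length_le
    have q2 := s2.length_le
    have q3 := s3.length_le
    have q4 := s4.length_le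
    have e1 : r1 = std := s1.eq_of_length (by omega)
    have e2 : r2 = r1 := s2.eq_of_length (by omega)
    have e3 : r3 = r2 := s3.eq_of_length (by omega)
    have e4 : rayScan w r3 c4 = r3 := s4.eq_of_length (by omega)
    refine ⟨e1, ?_, ?_, ?_⟩
    · calc rayScan w std c2 = rayScan w r1 c2 := by rw [e1]
        _ = r2 := h2.symm
        _ = std := by rw [e2, e1]
    · calc rayScan w std c3 = rayScan w r2 c3 := by rw [e2, e1]
        _ = r3 := h3.symm
        _ = std := by rw [e3, e2, e1]
    · calc rayScan w std c4 = rayScan w r3 c4 := by rw [e3, e2, e1]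
        _ = std := by rw [e4, e3, e2, e1]
  · rintro ⟨e1, e2, e3, e4⟩
    rw [e1, e2, e3, e4]

theorem foldl_teacherStep_sublist (w : List (List Int)) (N : Int) (teacher : List (List Int)) :
    ∀ std, (teacher.foldl (teacherStep w N) std).Sublist std := by
  induction teacher with
  | nil => intro std; simp
  | cons t rest ih =>
    intro std
    simp only [List.foldl_cons]
    exact (ih _).trans (teacherStep_sublist ..)

theorem foldl_teacherStep_eq_self_iff (w : List (List Int)) (N : Int) (teacher : List (List Int)) (std : List (List Int)) :
    teacher.foldl (teacherStep w N) std = std ↔ ∀ t ∈ teacher, teacherStep w N std t = std := by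
  induction teacher generalizing std with
  | nil => simp
  | cons t rest ih =>
    simp only [List.foldl_cons, List.forall_mem_cons]
    constructor
    · intro h
      have s0 : (List.foldl (teacherStep w N) (teacherStep w N std t) rest).Sublist (teacherStep w N std t) :=
        foldl_teacherStep_sublist w N rest _
      rw [h] at s0
      have e1 : teacherStep w N std t = std := (teacherStep_sublist ..).antisymm s0
      rw [e1] at h
      exact ⟨e1, (ih std).mp h⟩
    · rintro ⟨e1, hall⟩
      rw [e1]
      exact (ih std).mpr hall


theorem contains_ofList {T : Type} [BEq T] [LawfulBEq T] (l : List T) (c : T) :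
    PySem.Set.contains (PySem.Set.ofList l) c = true ↔ c ∈ l := by
  simp [PySem.Set.contains, PySem.Set.mem_ofList]

theorem rayHits_false_iff (wall student : List (List Int)) (cells : List (List Int)) :
    rayHits (PySem.Set.ofList wall) (PySem.Set.ofList student) cells = false ↔
      ∀ c ∈ cells.takeWhile (fun c => !decide (c ∈ wall)), c ∉ student := by
  induction cells with
  | nil => simp [rayHits]
  | cons c rest ih =>
    simp only [rayHits]
    by_cases hw : c ∈ wall
    · rw [if_pos ((contains_ofList wall c).mpr hw),
        List.takeWhile_cons_of_neg (by simp [hw])]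
      simp
    · have hwc : ¬ PySem.Set.contains (PySem.Set.ofList wall) c = true := by
        rw [contains_ofList]; exact hw
      rw [if_neg hwc, List.takeWhile_cons_of_pos (by simp [hw])]
      by_cases hs : c ∈ student
      · rw [if_pos ((contains_ofList student c).mpr hs)]
        simp [hs]
      · have hsc : ¬ PySem.Set.contains (PySem.Set.ofList student) c = true := by
          rw [contains_ofList]; exact hs
        rw [if_neg hsc, ih]
        simp [hs]

theorem check_alt_true_iff (student teacher wall : List (List Int)) (N : Int) :
    check_alt student teacher wall N = true ↔
      ∀ t ∈ teacher,
        (∀ c ∈ (((PySem.List.pyRange ((PySem.List.pyGet? t 0).getD 0 - 1) (-1) (-1)).map (fun i => [i, (PySem.List.pyGet? t 1).getD 0])).takeWhile (fun c => !decide (c ∈ wall))), c ∉ student) ∧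
        (∀ c ∈ (((PySem.List.pyRange ((PySem.List.pyGet? t 0).getD 0 + 1) N 1).map (fun i => [i, (PySem.List.pyGet? t 1).getD 0])).takeWhile (fun c => !decide (c ∈ wall))), c ∉ student) ∧
        (∀ c ∈ (((PySem.List.pyRange ((PySem.List.pyGet? t 1).getD 0 - 1) (-1) (-1)).map (fun i => [(PySem.List.pyGet? t 0).getD 0, i])).takeWhile (fun c => !decide (c ∈ wall))), c ∉ student) ∧
        (∀ c ∈ (((PySem.List.pyRange ((PySem.List.pyGet? t 1).getD 0 + 1) N 1).map (fun i => [(PySem.List.pyGet? t 0).getD 0, i])).takeWhile (fun c => !decide (c ∈ wall))), c ∉ student) := by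
  simp only [check_alt]
  rw [Bool.not_eq_eq_eq_not, Bool.not_true, List.any_eq_false]
  apply forall_congr'; intro t; apply forall_congr'; intro ht
  simp only [Bool.or_eq_true, not_or, Bool.not_eq_true]
  rw [rayHits_false_iff, rayHits_false_iff, rayHits_false_iff, rayHits_false_iff]
  tauto

theorem check_true_iff (student teacher wall : List (List Int)) (N : Int) :
    check student teacher wall N = true ↔ check_alt student teacher wall N = true := by
  have key : check student teacher wall N = true ↔
      teacher.foldl (teacherStep wall N) student = student := by
    simp only [check]
    split
    · next hc => exact ⟨fun _ => (foldl_teacherStep_sublist wall N teacher student).eq_of_length hc,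
        fun _ => rfl⟩
    · next hc => exact ⟨fun h => absurd h (by simp), fun h => absurd (by rw [h]) hc⟩
  rw [key, foldl_teacherStep_eq_self_iff, check_alt_true_iff student teacher wall N]
  apply forall_congr'; intro t; apply forall_congr'; intro ht
  rw [teacherStep_eq_self_iff,
    rayScan_eq_self_iff, rayScan_eq_self_iff, rayScan_eq_self_iff, rayScan_eq_self_iff]

-- ===== VERDICT (by name: the statement is the Claim_ definition above) =====
theorem check_spec : Claim_equal_check := by
  intro student teacher wall N _ _
  unfold Spec_check
  have h := check_true_iff student teacher wall N
  cases hca : check student teacher wall N <;> cases hcb : check_alt student teacher wall N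
  · rfl
  · rw [hca, hcb] at h; exact absurd (h.mpr rfl) (by simp)
  · rw [hca, hcb] at h; exact absurd (h.mp rfl) (by simp)
  · rfl
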